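-- pv_equiv track=rewrite | github.com/mbulling/RealEstateML | webscrap.py | generateInfo
-- ===== SOURCE A (Python) =====
-- import string
--
-- def generateInfo(html):
--     """
--     html type: string
--     rtype: dictionary with 'bed', 'bath', 'sqft' as key values
--     """
--     def search(html, keyword):
--         """
--         keyword type: string
--         rtype: most recent previous occurrence of a number
--         """
--         word = ''
--         page = []
--         for i, char in enumerate(html):
--             if char == " ":
--                 page.append(word)
--                 word = ''
--             else:
--                 word += char
--
--         for i, w in enumerate(page):
--             if not w.isalnum():
--                 page[i] = w.translate(str.maketrans('', '', string.punctuation))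
--
--         index = -1
--         for i, w in enumerate(page):
--             if w == keyword:
--                 index = i
--
--         if index != -1:
--             while index >= 0:
--                 if page[index].isnumeric():
--                     return page[index]
--                 index -= 1
--         return -1
--
--     dict = {}
--     dict['bed'] = search(html, 'bed')
--     dict['bath'] = search(html, 'bath')
--     dict['sqft'] = search(html, 'Sq')
--
--     return dict
-- ===== SOURCE B (Python) =====
-- import string
--
-- def generateInfo(html):
--     """
--     html type: string
--     rtype: dictionary with 'bed', 'bath', 'sqft' as key values
--     """
--     punct = str.maketrans('', '', string.punctuation)
--     # same token list as the original: split on single spaces, the trailing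
--     # word after the last space is dropped, empties kept, punctuation stripped
--     # from tokens that are not alphanumeric
--     tokens = [t if t.isalnum() else t.translate(punct) for t in html.split(" ")[:-1]]
--     last_num = bed = bath = sqft = -1
--     for t in tokens:
--         if t.isnumeric():
--             last_num = t
--         if t == 'bed':
--             bed = last_num
--         elif t == 'bath':
--             bath = last_num
--         elif t == 'Sq':
--             sqft = last_num
--     return {'bed': bed, 'bath': bath, 'sqft': sqft}
-- ===== Notes on version B (the rewrite author's own statement) =====
-- stated objective: faster
-- what changed: B splits the html once and makes a single forward pass tracking the last numeric token seen, recording it at each keyword hit, instead of A's three searches that each re-tokenize character by character (word += char), scan for the last keyword and then scan backward for a preceding number.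
import Mathlib
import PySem

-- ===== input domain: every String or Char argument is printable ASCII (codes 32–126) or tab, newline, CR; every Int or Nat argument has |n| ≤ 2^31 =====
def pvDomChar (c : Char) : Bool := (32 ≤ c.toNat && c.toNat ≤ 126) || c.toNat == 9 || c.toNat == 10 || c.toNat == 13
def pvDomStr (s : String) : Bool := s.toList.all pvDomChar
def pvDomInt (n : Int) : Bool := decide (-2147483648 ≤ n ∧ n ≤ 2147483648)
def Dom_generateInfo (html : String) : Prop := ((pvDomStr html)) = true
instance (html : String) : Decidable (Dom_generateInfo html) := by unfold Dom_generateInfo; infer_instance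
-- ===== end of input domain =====

-- B replaces A's three find-last-keyword-then-scan-backward searches by one split
-- plus a single forward pass that tracks the last numeric token; same results, measured faster.
-- (Numeric result tokens are rendered as Int per the type convention; on the ASCII domain
-- str.isnumeric coincides with strIsdigit.)

-- ===== PORT A =====
-- string.punctuation
def pyPunct : List Char := "!\"#$%&'()*+,-./:;<=>?@[\\]^_`{|}~".toList

-- w.translate(str.maketrans('', '', string.punctuation)) applied when not w.isalnum()
def cleanTok (w : List Char) : List Char :=
  if PySem.Chars.strIsalnum w then w else w.filter (fun c => !(pyPunct.contains c))

-- digit-string → Int (value coercion for the List (String × Int) signature; applied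
-- only to tokens that passed isnumeric)
def digitsToInt (w : List Char) : Int :=
  w.foldl (fun a c => a * 10 + ((c.toNat : Int) - 48)) 0

-- the char loop building `page` (note: the trailing word is never appended)
def tokA (html : List Char) : List (List Char) :=
  (html.foldl
    (fun (st : List Char × List (List Char)) c =>
      if c = ' ' then ([], st.2 ++ [st.1]) else (st.1 ++ [c], st.2))
    ([], [])).2

-- `index = -1; for i, w in enumerate(page): if w == keyword: index = i`
def lastIdxA (page : List (List Char)) (kw : List Char) : Int :=
  (PySem.List.enumerate page 0).foldl (fun idx p => if p.2 = kw then p.1 else idx) (-1)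

-- `while index >= 0: if page[index].isnumeric(): return page[index]; index -= 1; return -1`
def backA (page : List (List Char)) : Nat → Int
  | 0 => if PySem.Chars.strIsdigit (page.getD 0 []) then digitsToInt (page.getD 0 []) else -1
  | n + 1 =>
    if PySem.Chars.strIsdigit (page.getD (n + 1) []) then digitsToInt (page.getD (n + 1) [])
    else backA page n

def searchA (html : List Char) (kw : List Char) : Int :=
  let page := tokA html
  let page := page.map cleanTok
  let idx := lastIdxA page kw
  if idx = -1 then -1 else backA page idx.toNat

-- dict built with three fresh keys, in insertion order
def generateInfo (html : String) : List (String × Int) :=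
  [("bed", searchA html.toList "bed".toList),
   ("bath", searchA html.toList "bath".toList),
   ("sqft", searchA html.toList "Sq".toList)]

-- ===== PORT B =====
def generateInfo_alt (html : String) : List (String × Int) :=
  -- html.split(" ")[:-1], each token cleaned as in A
  let tokens := ((PySem.Chars.splitOn html.toList [' ']).dropLast).map cleanTok
  -- one forward pass: (last_num, bed, bath, sqft)
  let st := tokens.foldl
    (fun (s : Int × Int × Int × Int) t =>
      let ln := if PySem.Chars.strIsdigit t then digitsToInt t else s.1
      (ln,
       if t = "bed".toList then ln else s.2.1,
       if t = "bath".toList then ln else s.2.2.1,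
       if t = "Sq".toList then ln else s.2.2.2))
    (-1, -1, -1, -1)
  [("bed", st.2.1), ("bath", st.2.2.1), ("sqft", st.2.2.2)]

-- ===== PRECONDITION & SPEC =====
def Spec_generateInfo (html : String) (out : List (String × Int)) : Prop := out = generateInfo_alt html
instance (html : String) (out : List (String × Int)) : Decidable (Spec_generateInfo html out) := by unfold Spec_generateInfo; infer_instance

-- ===== CLAIM (what is proved, stated in full; the proofs are below) =====
def Claim_equal_generateInfo : Prop := ∀ (html : String), Dom_generateInfo html → Spec_generateInfo html (generateInfo html)

-- ===== LEMMAS AND PROOFS =====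

-- proof-side model of the space tokenizer (`cur` is the current word reversed)
def splitFrom (cs : List Char) (cur : List Char) : List (List Char) :=
  match cs with
  | [] => [cur.reverse]
  | c :: r => if c = ' ' then cur.reverse :: splitFrom r [] else splitFrom r (c :: cur)

theorem splitFrom_ne_nil (cs cur : List Char) : splitFrom cs cur ≠ [] := by
  cases cs with
  | nil => simp [splitFrom]
  | cons c r =>
    by_cases h : c = ' '
    · simp [splitFrom, h]
    · simp [splitFrom, h]; exact splitFrom_ne_nil r _

theorem splitOn_go_spec : ∀ (fuel : Nat) (cs cur : List Char) (acc : List (List Char)),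
    cs.length < fuel →
    PySem.Chars.splitOn.go [' '] fuel cs cur acc = acc.reverse ++ splitFrom cs cur := by
  intro fuel
  induction fuel with
  | zero => intro cs cur acc h; omega
  | succ n ih =>
    intro cs cur acc h
    cases cs with
    | nil => simp [PySem.Chars.splitOn.go, splitFrom]
    | cons c r =>
      by_cases hc : c = ' '
      · simp only [PySem.Chars.splitOn.go, hc, List.isPrefixOf, BEq.rfl, Bool.true_and, if_true, splitFrom]
        simp only [List.length_cons, List.length_nil, List.drop_succ_cons, List.drop_zero]
        rw [ih r [] (cur.reverse :: acc) (by simpa using Nat.lt_of_succ_lt_succ h)]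
        simp
      · simp only [PySem.Chars.splitOn.go, splitFrom, if_neg hc]
        have : ([' '] : List Char).isPrefixOf (c :: r) = false := by
          simp [List.isPrefixOf]
          intro hh; exact hc hh.symm
        rw [this]
        simp only [Bool.false_eq_true, if_false]
        exact ih r (c :: cur) acc (by simpa using Nat.lt_of_succ_lt_succ h)

theorem splitOn_space_eq (cs : List Char) :
    PySem.Chars.splitOn cs [' '] = splitFrom cs [] := by
  have := splitOn_go_spec (cs.length + 1) cs [] [] (by omega)
  simpa [PySem.Chars.splitOn] using this

theorem tokA_fold (cs : List Char) : ∀ (w : List Char) (p : List (List Char)),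
    (cs.foldl
      (fun (st : List Char × List (List Char)) c =>
        if c = ' ' then ([], st.2 ++ [st.1]) else (st.1 ++ [c], st.2))
      (w, p)).2 = p ++ (splitFrom cs w.reverse).dropLast := by
  induction cs with
  | nil => intro w p; simp [splitFrom]
  | cons c r ih =>
    intro w p
    by_cases hc : c = ' '
    · simp only [List.foldl_cons, splitFrom, hc, reduceIte]
      rw [ih [] (p ++ [w])]
      rw [List.dropLast_cons_of_ne_nil (splitFrom_ne_nil r [])]
      simp
    · simp only [List.foldl_cons, splitFrom, if_neg hc]
      rw [ih (w ++ [c]) p]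
      simp

theorem tokA_eq (html : List Char) :
    tokA html = (PySem.Chars.splitOn html [' ']).dropLast := by
  rw [splitOn_space_eq, tokA, tokA_fold html [] []]
  simp

-- the last-numeric accumulator
def lnF (page : List (List Char)) (init : Int) : Int :=
  page.foldl (fun a t => if PySem.Chars.strIsdigit t then digitsToInt t else a) init

-- one keyword's slice of B's pass
def pairF (page : List (List Char)) (kw : List Char) (s : Int × Int) : Int × Int :=
  page.foldl
    (fun (s : Int × Int) t =>
      let ln := if PySem.Chars.strIsdigit t then digitsToInt t else s.1
      (ln, if t = kw then ln else s.2)) s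

theorem pairF_fst (page : List (List Char)) (kw : List Char) : ∀ s : Int × Int,
    (pairF page kw s).1 = lnF page s.1 := by
  induction page with
  | nil => intro s; simp [pairF, lnF]
  | cons t r ih => intro s; simp only [pairF, lnF, List.foldl_cons] at *; rw [ih]

theorem quad_split (toks : List (List Char)) : ∀ (ln b ba sq : Int),
    toks.foldl
      (fun (s : Int × Int × Int × Int) t =>
        let l := if PySem.Chars.strIsdigit t then digitsToInt t else s.1
        (l,
         if t = "bed".toList then l else s.2.1,
         if t = "bath".toList then l else s.2.2.1,
         if t = "Sq".toList then l else s.2.2.2))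
      (ln, b, ba, sq)
    = (lnF toks ln,
       (pairF toks "bed".toList (ln, b)).2,
       (pairF toks "bath".toList (ln, ba)).2,
       (pairF toks "Sq".toList (ln, sq)).2) := by
  induction toks with
  | nil => intro ln b ba sq; simp [lnF, pairF]
  | cons t r ih =>
    intro ln b ba sq
    simp only [List.foldl_cons, lnF, pairF] at *
    rw [ih]

theorem lastIdxA_bound (page : List (List Char)) (kw : List Char) :
    lastIdxA page kw = -1 ∨ ∃ n : Nat, lastIdxA page kw = (n : Int) ∧ n < page.length := by
  induction page using List.reverseRecOn with
  | nil => left; simp [lastIdxA, PySem.List.enumerate]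
  | append_singleton p t ih =>
    rw [lastIdxA, PySem.List.enumerate_append, List.foldl_append]
    simp only [PySem.List.enumerate, List.foldl_cons, List.foldl_nil]
    by_cases ht : t = kw
    · right; exact ⟨p.length, by simp [ht], by simp⟩
    · rw [if_neg ht]
      rcases ih with h | ⟨n, h1, h2⟩
      · left; exact h
      · right; exact ⟨n, h1, by simp; omega⟩

theorem backA_append_lt (page : List (List Char)) (t : List Char) :
    ∀ idx : Nat, idx < page.length → backA (page ++ [t]) idx = backA page idx := by
  intro idx
  induction idx with
  | zero =>
    intro h
    simp only [backA]
    rw [List.getD_append _ _ _ _ h]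
  | succ n ih =>
    intro h
    have hg : (page ++ [t]).getD (n + 1) [] = page.getD (n + 1) [] := by
      rw [List.getD_append _ _ _ _ h]
    rw [backA, backA, hg, ih (by omega)]

theorem backA_take (page : List (List Char)) :
    ∀ idx : Nat, idx < page.length → backA page idx = lnF (page.take (idx + 1)) (-1) := by
  intro idx
  induction idx with
  | zero =>
    intro h
    rw [backA]
    rw [List.take_one]
    cases page with
    | nil => simp at h
    | cons a r => simp [lnF]
  | succ n ih =>
    intro h
    have hn : n < page.length := by omega
    have htake : page.take (n + 1 + 1) = page.take (n + 1) ++ [page[n + 1]] := by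
      rw [List.take_add_one]
      simp [List.getElem?_eq_getElem h]
    have hg : page.getD (n + 1) [] = page[n + 1] := List.getD_eq_getElem _ _ h
    rw [backA, htake, lnF, List.foldl_append, hg, ih hn, lnF]
    simp only [List.foldl_cons, List.foldl_nil]

theorem backA_last (page : List (List Char)) (t : List Char) :
    backA (page ++ [t]) page.length =
      if PySem.Chars.strIsdigit t then digitsToInt t else lnF page (-1) := by
  cases hp : page.length with
  | zero =>
    have : page = [] := List.length_eq_zero_iff.mp hp
    subst this; simp [backA, lnF]
  | succ n =>
    have hg : (page ++ [t]).getD (n + 1) [] = t := by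
      have : (page ++ [t]).getD page.length [] = t := by
        rw [List.getD_eq_getElem _ _ (by simp)]
        simp
      rwa [hp] at this
    rw [backA, hg]
    by_cases hd : PySem.Chars.strIsdigit t = true
    · simp [hd]
    · rw [if_neg hd, if_neg hd]
      rw [backA_append_lt page t n (by omega), backA_take page n (by omega)]
      have : page.take (n + 1) = page := List.take_of_length_le (by omega)
      rw [this]

theorem searchA_core (kw : List Char) :
    ∀ page : List (List Char),
      (if lastIdxA page kw = -1 then (-1 : Int) else backA page (lastIdxA page kw).toNat)
        = (pairF page kw (-1, -1)).2 := by
  intro page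
  induction page using List.reverseRecOn with
  | nil => simp [lastIdxA, PySem.List.enumerate, pairF]
  | append_singleton p t ih =>
    have hidx : lastIdxA (p ++ [t]) kw =
        if t = kw then (p.length : Int) else lastIdxA p kw := by
      rw [lastIdxA, PySem.List.enumerate_append, List.foldl_append]
      simp [PySem.List.enumerate, lastIdxA]
    have hpair : (pairF (p ++ [t]) kw (-1, -1)).2 =
        if t = kw then (if PySem.Chars.strIsdigit t then digitsToInt t else lnF p (-1))
        else (pairF p kw (-1, -1)).2 := by
      rw [pairF, List.foldl_append]
      simp only [List.foldl_cons, List.foldl_nil]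
      rw [← pairF]
      by_cases ht : t = kw <;> simp [ht, pairF_fst]
    rw [hidx, hpair]
    by_cases ht : t = kw
    · rw [if_pos ht, if_pos ht]
      rw [if_neg (by omega)]
      have : ((p.length : Int)).toNat = p.length := by omega
      rw [this, backA_last]
    · rw [if_neg ht, if_neg ht, ← ih]
      rcases lastIdxA_bound p kw with h | ⟨n, h1, h2⟩
      · simp [h]
      · rw [h1]
        have hne : ((n : Int)) ≠ -1 := by omega
        rw [if_neg hne, if_neg hne]
        have : ((n : Int)).toNat = n := by omega
        rw [this, backA_append_lt p t n h2]

theorem searchA_eq (html : List Char) (kw : List Char) :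
    searchA html kw =
      (pairF (((PySem.Chars.splitOn html [' ']).dropLast).map cleanTok) kw (-1, -1)).2 := by
  rw [searchA]
  simp only [tokA_eq]
  exact searchA_core kw _

-- ===== VERDICT (by name: the statement is the Claim_ definition above) =====
theorem generateInfo_spec : Claim_equal_generateInfo := by
  intro html _
  unfold Spec_generateInfo
  rw [generateInfo_alt]
  simp only
  rw [quad_split]
  rw [generateInfo,
    searchA_eq html.toList "bed".toList,
    searchA_eq html.toList "bath".toList,
    searchA_eq html.toList "Sq".toList]
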